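-- pv_equiv track=rewrite | github.com/cadizm/foo.bar | level-03/string_cleaning/solution.py | answer
-- ===== SOURCE A (Python) =====
-- def answer(chunk, word):
--     m = len(word)
--     chunks = uninsert(chunk, word, m)
--
--     if not chunks:
--         return chunk
--
--     earliest = None
--     for c in chunks:
--         a = answer(c, word)
--         if earliest is None or a < earliest:
--             earliest = a
--
--     if earliest is None:
--         raise Exception('None for (%s, %s)' % (chunk, word))
--
--     return earliest
--
-- def uninsert(chunk, word, m):
--     res = set()
--
--     indices = indices_rabin_karp(chunk, word, m)
--
--     for i in indices:
--         a = chunk[:i]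
--         c = chunk[i+m:]
--
--         res.add(a + c)
--
--     return res
--
-- def indices_rabin_karp(chunk, word, m):
--     res = []
--     n = len(chunk)
--
--     h = rabin_fingerprint(word)
--     p = rabin_fingerprint(chunk[:m])
--
--     for i in range(n - m + 1):
--         if h == p and word == chunk[i:i+m]:
--             yield i
--
--         p = rabin_fingerprint(chunk[i+1:i+m+1], prev=p, remove=chunk[i])
--
-- def rabin_fingerprint(S, base=101, prev=None, remove=None):
--     if prev is None or not S:
--         res = 0
--         for i, s in enumerate(reversed(S)):
--             res += ord(s) * base**i
--
--     else:
--         m = len(S) - 1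
--         add = S[-1]
--         res = base * (prev - (ord(remove) * base**m)) + (ord(add) * base**0)
--
--     return res
-- ===== SOURCE B (Python) =====
-- def answer(chunk, word):
--     m = len(word)
--     memo = {}
--
--     def go(s):
--         if s in memo:
--             return memo[s]
--         occ = [i for i in range(len(s) - m + 1) if s[i:i+m] == word]
--         if not occ:
--             res = s
--         else:
--             res = min(go(s[:i] + s[i+m:]) for i in occ)
--         memo[s] = res
--         return res
--
--     return go(chunk)
-- ===== Notes on version B (the rewrite author's own statement) =====
-- stated objective: faster
-- what changed: A's plain exponential recursion (Rabin-Karp fingerprint scan + a set of child strings, re-solving every reachable substring from scratch) is replaced by a memoized depth-first search with a direct sliding-window occurrence scan, so each distinct reachable substring is solved once.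
import Mathlib
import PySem

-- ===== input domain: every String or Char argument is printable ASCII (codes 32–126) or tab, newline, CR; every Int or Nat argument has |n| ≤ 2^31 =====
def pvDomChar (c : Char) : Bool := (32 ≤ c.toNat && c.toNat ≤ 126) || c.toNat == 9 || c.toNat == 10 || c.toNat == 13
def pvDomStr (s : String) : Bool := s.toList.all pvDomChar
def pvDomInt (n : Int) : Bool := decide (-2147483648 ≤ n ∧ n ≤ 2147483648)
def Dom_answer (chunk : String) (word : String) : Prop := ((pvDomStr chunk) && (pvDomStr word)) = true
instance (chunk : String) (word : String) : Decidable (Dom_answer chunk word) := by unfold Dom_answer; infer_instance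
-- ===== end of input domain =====

-- B replaces A's exponential recursion (Rabin–Karp occurrence search + set of children, recursed
-- afresh on every chunk) by a memoized DP over the reachable substrings with a direct window scan;
-- equivalence of the RETURN value is proved for word ≠ "" (on word = "" the Python A never returns).

-- ===== PORT A =====

-- the 'for i, s in enumerate(reversed(S)): res += ord(s) * base**i' loop of rabin_fingerprint
def fpLoop (base : Int) (l : List Char) (i : Nat) (acc : Int) : Int :=
  match l with
  | [] => acc
  | c :: t => fpLoop base t (i + 1) (acc + (c.toNat : Int) * base ^ i)

-- rabin_fingerprint(S, base=101, prev=None, remove=None); 'remove' is the one-character string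
-- chunk[i], carried as Option Char ('.getD 0' is only reached where Python would raise TypeError,
-- which no call site does)
def rabinFingerprint (S : List Char) (base : Int) (prev : Option Int) (remove : Option Char) : Int :=
  match prev, S with
  | some pv, a :: rest =>
      let m := (a :: rest).length - 1
      let add := (a :: rest).getLast (List.cons_ne_nil a rest)
      base * (pv - (((remove.map Char.toNat).getD 0 : Nat) : Int) * base ^ m) + (add.toNat : Int) * base ^ (0 : Nat)
  | _, _ => fpLoop base S.reverse 0 0

-- the 'for i in range(n - m + 1)' loop of indices_rabin_karp (the generator, fully consumed)
def rkLoop (chunk word : List Char) (m : Nat) (h : Int) (is : List Int) (p : Int) (acc : List Int) : List Int :=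
  match is with
  | [] => acc
  | i :: rest =>
      let acc' := if h == p && word == PySem.List.slice chunk (some i) (some (i + m)) then acc ++ [i] else acc
      let p' := rabinFingerprint (PySem.List.slice chunk (some (i + 1)) (some (i + m + 1))) 101 (some p)
                  (PySem.List.pyGet? chunk i)
      rkLoop chunk word m h rest p' acc'

def indicesRabinKarp (chunk word : List Char) (m : Nat) : List Int :=
  let n := chunk.length
  let h := rabinFingerprint word 101 none none
  let p := rabinFingerprint (PySem.List.slice chunk none (some (m : Int))) 101 none none
  rkLoop chunk word m h (PySem.List.pyRange 0 ((n : Int) - (m : Int) + 1)) p []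

def uninsert (chunk word : List Char) (m : Nat) : PySem.Set (List Char) :=
  (indicesRabinKarp chunk word m).foldl
    (fun res i =>
      PySem.Set.add res (PySem.List.slice chunk none (some i) ++ PySem.List.slice chunk (some (i + (m : Int))) none))
    PySem.Set.empty

-- answer(chunk, word); fuel = |chunk| + 1 bounds the recursion depth (each step removes |word| ≥ 1
-- characters); the fuel-0 and earliest-none branches are unreachable on the claimed inputs
def answerA (fuel : Nat) (chunk word : List Char) : List Char :=
  match fuel with
  | 0 => chunk
  | fuel + 1 =>
    let m := word.length
    let chunks := uninsert chunk word m
    if chunks.isEmpty then chunk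
    else
      let earliest := chunks.foldl
        (fun earliest c =>
          let a := answerA fuel c word
          match earliest with
          | none => some a
          | some e => if a < e then some a else some e) none
      match earliest with
      | some e => e
      | none => chunk   -- Python raises Exception here; unreachable (chunks nonempty)
termination_by fuel

def answer (chunk : String) (word : String) : String :=
  String.ofList (answerA (chunk.toList.length + 1) chunk.toList word.toList)

-- ===== PORT B =====

-- occ = [i for i in range(len(s) - m + 1) if s[i:i+m] == word]
def occAlt (s word : List Char) (m : Nat) : List Int :=
  (PySem.List.pyRange 0 ((s.length : Int) - (m : Int) + 1)).filter
    (fun i => PySem.List.slice s (some i) (some (i + (m : Int))) == word)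

-- go(s) with the closure's memo dict threaded through; min(...) over the generator is the running
-- first-minimum fold; fuel as in answerA
def goAlt (fuel : Nat) (word : List Char) (m : Nat) (s : List Char)
    (memo : PySem.Dict (List Char) (List Char)) : PySem.Dict (List Char) (List Char) × List Char :=
  match fuel with
  | 0 => (memo, s)
  | fuel + 1 =>
    match memo.get? s with
    | some v => (memo, v)
    | none =>
      let occ := occAlt s word m
      if occ.isEmpty then (memo.insert s s, s)
      else
        let st := occ.foldl
          (fun (st : PySem.Dict (List Char) (List Char) × Option (List Char)) i =>
            let r := goAlt fuel word m
                       (PySem.List.slice s none (some i) ++ PySem.List.slice s (some (i + (m : Int))) none) st.1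
            (r.1, match st.2 with
                  | none => some r.2
                  | some b => if r.2 < b then some r.2 else some b))
          (memo, none)
        match st.2 with
        | some res => (st.1.insert s res, res)
        | none => (st.1.insert s s, s)   -- unreachable: occ nonempty
termination_by fuel

def answer_alt (chunk : String) (word : String) : String :=
  String.ofList (goAlt (chunk.toList.length + 1) word.toList word.toList.length chunk.toList PySem.Dict.empty).2

-- ===== PRECONDITION & SPEC =====

-- Pre_ excludes only word = "": there the Python A never returns normally (RecursionError on a
-- nonempty chunk, IndexError on chunk = "")
def Pre_answer (chunk : String) (word : String) : Prop := word ≠ ""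
instance (chunk : String) (word : String) : Decidable (Pre_answer chunk word) := by
  unfold Pre_answer; infer_instance

def pvWitness_answer : String × String := ("abcabc", "bc")

def Spec_answer (chunk : String) (word : String) (out : String) : Prop := out = answer_alt chunk word
instance (chunk : String) (word : String) (out : String) : Decidable (Spec_answer chunk word out) := by
  unfold Spec_answer; infer_instance

-- ===== CLAIM (what is proved, stated in full; the proofs are below) =====
def Claim_equal_answer : Prop := ∀ (chunk : String) (word : String), Dom_answer chunk word →
  Pre_answer chunk word → Spec_answer chunk word (answer chunk word)

-- ===== LEMMAS AND PROOFS =====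

-- specification-side helpers (used only by the proofs)

-- positions where word occurs in s, as naturals
def occN (w s : List Char) : List Nat :=
  (List.range (s.length + 1 - w.length)).filter (fun i => decide (w <+: s.drop i))

-- s with the occurrence starting at i removed
def childAt (w s : List Char) (i : Nat) : List Char := s.take i ++ s.drop (i + w.length)

-- the common value: lexicographically least string reachable by repeated removal (fueled)
def best (fuel : Nat) (w s : List Char) : List Char :=
  match fuel with
  | 0 => s
  | f + 1 =>
    match (occN w s).map (fun i => best f w (childAt w s i)) with
    | [] => s
    | v :: vs => vs.foldl min v
termination_by fuel

-- Horner form of the base-101 fingerprint (low-order character first)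
def fpH (l : List Char) : Int :=
  match l with
  | [] => 0
  | c :: t => (c.toNat : Int) + 101 * fpH t

def fpG (l : List Char) : Int := fpH l.reverse

lemma fpLoop_eq (l : List Char) : ∀ (i : Nat) (acc : Int), fpLoop 101 l i acc = acc + 101 ^ i * fpH l := by
  induction l with
  | nil => intro i acc; simp [fpLoop, fpH]
  | cons c t ih =>
      intro i acc
      simp only [fpLoop, fpH, ih]
      ring

lemma fp_eq (l : List Char) : rabinFingerprint l 101 none none = fpG l := by
  simp [rabinFingerprint, fpLoop_eq, fpG]

lemma fpH_append (xs : List Char) (c : Char) : fpH (xs ++ [c]) = fpH xs + (c.toNat : Int) * 101 ^ xs.length := by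
  induction xs with
  | nil => simp [fpH]
  | cons x t ih => simp [fpH, ih]; ring

lemma fpG_append (l : List Char) (a : Char) : fpG (l ++ [a]) = 101 * fpG l + (a.toNat : Int) := by
  simp [fpG, fpH]; ring

lemma fpG_cons (c : Char) (l : List Char) : fpG (c :: l) = (c.toNat : Int) * 101 ^ l.length + fpG l := by
  simp [fpG, fpH_append]; ring

-- the window s[j:j+m]
def win (s : List Char) (j m : Nat) : List Char := (s.drop j).take m

lemma win_len {s : List Char} {j m : Nat} (h : j + m ≤ s.length) : (win s j m).length = m := by
  simp [win]; omega

lemma rf_step (S : List Char) (hS : S ≠ []) (pv : Int) (r : Char) :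
    rabinFingerprint S 101 (some pv) (some r)
      = 101 * (pv - (r.toNat : Int) * 101 ^ (S.length - 1)) + ((S.getLast hS).toNat : Int) := by
  cases S with
  | nil => exact absurd rfl hS
  | cons a t => simp [rabinFingerprint]

lemma rkLoop_go (s w : List Char) (hm : 0 < w.length) (hmn : w.length ≤ s.length) :
    ∀ (k j : Nat) (p : Int) (acc : List Int),
      j + k = s.length - w.length + 1 →
      (k = 0 ∨ p = fpG (win s j w.length)) →
      rkLoop s w w.length (fpG w) (PySem.List.pyRange (j : Int) ((s.length : Int) - (w.length : Int) + 1)) p acc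
        = acc ++ ((List.range' j k).filter (fun t => decide (w <+: s.drop t))).map (fun t : Nat => (t : Int)) := by
  intro k
  induction k with
  | zero =>
    intro j p acc hjk _
    have hb : ((s.length : Int) - (w.length : Int) + 1) ≤ (j : Int) := by omega
    rw [PySem.List.pyRange_one_eq_nil hb]
    simp [rkLoop]
  | succ k ih =>
    intro j p acc hjk hp
    have hjn : j + w.length ≤ s.length := by omega
    have hjlt : (j : Int) < (s.length : Int) - (w.length : Int) + 1 := by omega
    have hp' : p = fpG (win s j w.length) := hp.resolve_left (by omega)
    rw [PySem.List.pyRange_one_cons hjlt]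
    simp only [rkLoop]
    have hslice : PySem.List.slice s (some (j : Int)) (some ((j : Int) + (w.length : Int)))
        = win s j w.length := by
      have hcast : (j : Int) + (w.length : Int) = ((j + w.length : Nat) : Int) := by push_cast; ring
      rw [hcast, PySem.List.slice_natCast]
      simp [win]
    rw [hslice]
    have hcond : (fpG w == p && w == win s j w.length) = decide (w <+: s.drop j) := by
      by_cases hws : w <+: s.drop j
      · have hweq : w = win s j w.length := by
          rw [win]; exact (List.prefix_iff_eq_take).1 hws
        simp [hp', ← hweq, hws]
      · have hne : ¬ (w = win s j w.length) := by
          intro h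
          exact hws (by rw [h, win]; exact List.take_prefix _ _)
        simp [hws, hne]
    rw [hcond]
    have hrangestep : List.range' j (k + 1) = j :: List.range' (j + 1) k := List.range'_succ
    rcases Nat.eq_zero_or_pos k with hk0 | hkpos
    · subst hk0
      have hb : ((s.length : Int) - (w.length : Int) + 1) ≤ (j : Int) + 1 := by omega
      rw [PySem.List.pyRange_one_eq_nil hb]
      by_cases hws : w <+: s.drop j <;>
        simp [rkLoop, hws, hrangestep]
    · -- middle iteration: establish the rolling-hash invariant for j+1
      have hjn1 : j + 1 + w.length ≤ s.length := by omega
      have hjlt' : j < s.length := by omega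
      obtain ⟨m', hm'⟩ := Nat.exists_eq_succ_of_ne_zero (Nat.pos_iff_ne_zero.mp hm)
      have hslice2 : PySem.List.slice s (some ((j : Int) + 1)) (some ((j : Int) + (w.length : Int) + 1))
          = win s (j + 1) w.length := by
        have h1 : (j : Int) + 1 = ((j + 1 : Nat) : Int) := by push_cast; ring
        have h2 : (j : Int) + (w.length : Int) + 1 = ((j + 1 + w.length : Nat) : Int) := by push_cast; ring
        rw [h1, h2, PySem.List.slice_natCast]
        simp [win]
      have hget : PySem.List.pyGet? s (j : Int) = some s[j] := by
        rw [PySem.List.pyGet?_natCast]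
        exact List.getElem?_eq_getElem hjlt'
      rw [hslice2, hget]
      have hdrop : s.drop j = s[j] :: s.drop (j + 1) := List.drop_eq_getElem_cons hjlt'
      have hmidlen : ((s.drop (j + 1)).take m').length = m' := by simp; omega
      have hwj : win s j w.length = s[j] :: (s.drop (j + 1)).take m' := by
        rw [win, hdrop, hm', List.take_succ_cons]
      have hidx : (s.drop (j + 1))[m']? = some s[j + 1 + m'] := by
        rw [List.getElem?_drop]
        exact List.getElem?_eq_getElem (by omega)
      have hwj1 : win s (j + 1) w.length = (s.drop (j + 1)).take m' ++ [s[j + 1 + m']] := by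
        rw [win, hm', List.take_add_one, hidx]
        rfl
      have hSne : win s (j + 1) w.length ≠ [] := by rw [hwj1]; simp
      have hplen1 : (win s (j + 1) w.length).length = w.length := win_len hjn1
      have hlast : (win s (j + 1) w.length).getLast hSne = s[j + 1 + m'] := by
        have h1 : (win s (j + 1) w.length).getLast? = some s[j + 1 + m'] := by
          rw [hwj1]; exact List.getLast?_concat
        rw [List.getLast?_eq_some_getLast hSne] at h1
        exact Option.some.inj h1
      have hp2 : rabinFingerprint (win s (j + 1) w.length) 101 (some p) (some s[j])
          = fpG (win s (j + 1) w.length) := by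
        rw [rf_step _ hSne, hlast, hplen1]
        rw [hp', hwj, fpG_cons, hmidlen]
        conv_rhs => rw [hwj1, fpG_append]
        rw [hm']
        simp only [Nat.succ_sub_one]
        ring
      rw [hp2]
      rw [show ((j : Int) + 1) = ((j + 1 : Nat) : Int) from by push_cast; ring]
      rw [ih (j + 1) _ _ (by omega) (Or.inr rfl)]
      rw [hrangestep, List.filter_cons]
      by_cases hws : w <+: s.drop j <;> simp [hws]

lemma indices_eq (s w : List Char) (hw : w ≠ []) :
    indicesRabinKarp s w w.length = (occN w s).map (fun t : Nat => (t : Int)) := by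
  have hm : 0 < w.length := List.length_pos_of_ne_nil hw
  simp only [indicesRabinKarp]
  by_cases hmn : w.length ≤ s.length
  · have h0 : PySem.List.slice s none (some ((w.length : Nat) : Int)) = win s 0 w.length := by
      rw [PySem.List.slice_to _ (Int.natCast_nonneg _)]
      simp [win]
    rw [fp_eq, h0, fp_eq]
    have := rkLoop_go s w hm hmn (s.length - w.length + 1) 0 (fpG (win s 0 w.length)) []
      (by omega) (Or.inr rfl)
    rw [show ((0 : Nat) : Int) = (0 : Int) from rfl] at this
    rw [this]
    rw [occN, show s.length + 1 - w.length = s.length - w.length + 1 from by omega,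
      List.range_eq_range']
    simp
  · have hb : ((s.length : Int) - (w.length : Int) + 1) ≤ 0 := by omega
    rw [PySem.List.pyRange_one_eq_nil hb]
    rw [occN, show s.length + 1 - w.length = 0 from by omega]
    simp [rkLoop]

lemma mem_occN {w s : List Char} {i : Nat} (hi : i ∈ occN w s) :
    i + w.length ≤ s.length ∧ w <+: s.drop i := by
  rw [occN, List.mem_filter, List.mem_range] at hi
  refine ⟨by omega, by simpa using hi.2⟩

lemma child_len {w s : List Char} {i : Nat} (hi : i ∈ occN w s) :
    (childAt w s i).length = s.length - w.length := by
  have h := (mem_occN hi).1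
  simp [childAt]
  omega

lemma uninsert_eq (s w : List Char) (hw : w ≠ []) :
    uninsert s w w.length = PySem.Set.ofList ((occN w s).map (childAt w s)) := by
  simp only [uninsert, indices_eq s w hw]
  simp only [PySem.Set.ofList_eq_foldl, List.foldl_map]
  apply PySem.List.foldl_congr_mem
  intro acc t _
  congr 1
  rw [PySem.List.slice_to _ (Int.natCast_nonneg _)]
  rw [show ((t : Int) + (w.length : Int)) = ((t + w.length : Nat) : Int) from by push_cast; ring]
  rw [PySem.List.slice_from _ (Int.natCast_nonneg _)]
  simp [childAt]
  omega

lemma optfold_eq (vs : List (List Char)) (v : List Char) :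
    vs.foldl (fun e a => match e with | none => some a | some b => if a < b then some a else some b) (some v)
      = some (vs.foldl min v) := by
  induction vs generalizing v with
  | nil => rfl
  | cons a t ih =>
    simp only [List.foldl_cons]
    rw [show (if a < v then some a else some v) = some (min v a) from by
      rcases lt_or_ge a v with h | h
      · simp [h, min_eq_right (le_of_lt h)]
      · simp [not_lt.mpr h, min_eq_left h]]
    exact ih (min v a)

lemma minfold_eq_of_same_mem (v1 v2 : List Char) (vs1 vs2 : List (List Char))
    (h : ∀ x, x ∈ v1 :: vs1 ↔ x ∈ v2 :: vs2) : vs1.foldl min v1 = vs2.foldl min v2 := by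
  have h1 := PySem.List.foldl_min_le vs1 v1
  have h2 := PySem.List.foldl_min_le vs2 v2
  have m1 : vs1.foldl min v1 ∈ v1 :: vs1 := by
    rcases PySem.List.foldl_min_mem vs1 v1 with h' | h'
    · rw [h']; exact List.mem_cons_self
    · exact List.mem_cons_of_mem _ h'
  have m2 : vs2.foldl min v2 ∈ v2 :: vs2 := by
    rcases PySem.List.foldl_min_mem vs2 v2 with h' | h'
    · rw [h']; exact List.mem_cons_self
    · exact List.mem_cons_of_mem _ h'
  have le1 : ∀ y ∈ v1 :: vs1, vs1.foldl min v1 ≤ y := by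
    intro y hy
    rcases List.mem_cons.1 hy with rfl | hy'
    · exact h1.1
    · exact h1.2 y hy'
  have le2 : ∀ y ∈ v2 :: vs2, vs2.foldl min v2 ≤ y := by
    intro y hy
    rcases List.mem_cons.1 hy with rfl | hy'
    · exact h2.1
    · exact h2.2 y hy'
  exact le_antisymm (le1 _ ((h _).2 m2)) (le2 _ ((h _).1 m1))

lemma optMinBy_cons {α : Type} (g : α → List Char) (c0 : α) (cs : List α) :
    (c0 :: cs).foldl
        (fun e c => match e with
          | none => some (g c)
          | some b => if g c < b then some (g c) else some b) none
      = some (((cs.map g)).foldl min (g c0)) := by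
  simp only [List.foldl_cons]
  rw [← optfold_eq (cs.map g) (g c0), List.foldl_map]

lemma answerA_eq (w : List Char) (hw : w ≠ []) : ∀ (fuel : Nat) (s : List Char),
    answerA fuel s w = best fuel w s := by
  intro fuel
  induction fuel with
  | zero => intro s; simp [answerA, best]
  | succ f ih =>
    intro s
    simp only [answerA, best]
    rw [uninsert_eq s w hw]
    cases hocc : occN w s with
    | nil => simp [PySem.Set.ofList_nil]
    | cons i is =>
      have hmemhd : childAt w s i ∈ PySem.Set.ofList ((i :: is).map (childAt w s)) := by
        rw [PySem.Set.mem_ofList]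
        exact List.mem_map_of_mem List.mem_cons_self
      cases hset : PySem.Set.ofList ((i :: is).map (childAt w s)) with
      | nil => rw [hset] at hmemhd; cases hmemhd
      | cons c0 cs =>
        simp only [List.isEmpty_cons, Bool.false_eq_true, if_false, List.map_cons]
        simp only [ih]
        rw [optMinBy_cons (fun c => best f w c) c0 cs]
        apply minfold_eq_of_same_mem
        intro x
        rw [show (best f w c0 :: cs.map (fun c => best f w c))
            = (c0 :: cs).map (fun c => best f w c) from rfl]
        rw [show (best f w (childAt w s i) :: is.map (fun i => best f w (childAt w s i)))
            = ((childAt w s i :: is.map (childAt w s)).map (fun c => best f w c)) from by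
          simp [List.map_map, Function.comp]]
        simp only [List.mem_map]
        constructor
        · rintro ⟨y, hy, rfl⟩
          refine ⟨y, ?_, rfl⟩
          have : y ∈ PySem.Set.ofList ((i :: is).map (childAt w s)) := by rw [hset]; exact hy
          rw [PySem.Set.mem_ofList] at this
          simpa using this
        · rintro ⟨y, hy, rfl⟩
          refine ⟨y, ?_, rfl⟩
          have : y ∈ PySem.Set.ofList ((i :: is).map (childAt w s)) := by
            rw [PySem.Set.mem_ofList]; simpa using hy
          rw [hset] at this; exact this

lemma best_stable (w : List Char) (hw : w ≠ []) : ∀ (f1 f2 : Nat) (s : List Char),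
    s.length < f1 → s.length < f2 → best f1 w s = best f2 w s := by
  have hm : 0 < w.length := List.length_pos_of_ne_nil hw
  intro f1
  induction f1 with
  | zero => intro f2 s h1 _; omega
  | succ f ih =>
    intro f2 s h1 h2
    cases f2 with
    | zero => omega
    | succ f2' =>
      simp only [best]
      have : (occN w s).map (fun i => best f w (childAt w s i))
          = (occN w s).map (fun i => best f2' w (childAt w s i)) := by
        apply List.map_congr_left
        intro i hi
        have hlen := child_len hi
        have hle := (mem_occN hi).1
        exact ih f2' (childAt w s i) (by omega) (by omega)
      rw [this]

def MemoOK (w : List Char) (memo : PySem.Dict (List Char) (List Char)) : Prop :=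
  ∀ k v, memo.get? k = some v → v = best (k.length + 1) w k

lemma occAlt_eq (s w : List Char) (hw : w ≠ []) :
    occAlt s w w.length = (occN w s).map (fun t : Nat => (t : Int)) := by
  have hm : 0 < w.length := List.length_pos_of_ne_nil hw
  by_cases hmn : w.length ≤ s.length
  · rw [occAlt, occN]
    rw [show ((s.length : Int) - (w.length : Int) + 1) = ((s.length + 1 - w.length : Nat) : Int) from
      by omega]
    rw [PySem.List.pyRange_zero_natCast, List.filter_map]
    refine congrArg (List.map _) (List.filter_congr ?_)
    intro t ht
    rw [List.mem_range] at ht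
    have htm : t + w.length ≤ s.length := by omega
    simp only [Function.comp]
    rw [show ((t : Int) + (w.length : Int)) = ((t + w.length : Nat) : Int) from by push_cast; ring,
      PySem.List.slice_natCast]
    rw [show t + w.length - t = w.length from by omega]
    by_cases hws : w <+: s.drop t
    · have hweq : (s.drop t).take w.length = w := ((List.prefix_iff_eq_take).1 hws).symm
      simp [hweq, hws]
    · have hne : ¬ ((s.drop t).take w.length = w) := by
        intro h
        exact hws (by rw [← h]; exact List.take_prefix _ _)
      simp [hws]
      exact fun h => hne h
  · rw [occAlt, occN]
    have hb : ((s.length : Int) - (w.length : Int) + 1) ≤ 0 := by omega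
    rw [PySem.List.pyRange_one_eq_nil hb,
      show s.length + 1 - w.length = 0 from by omega]
    simp

lemma childAt_slice (s w : List Char) (j : Nat) :
    PySem.List.slice s none (some (j : Int)) ++ PySem.List.slice s (some ((j : Int) + (w.length : Int))) none
      = childAt w s j := by
  rw [PySem.List.slice_to _ (Int.natCast_nonneg _),
    show ((j : Int) + (w.length : Int)) = ((j + w.length : Nat) : Int) from by push_cast; ring,
    PySem.List.slice_from _ (Int.natCast_nonneg _)]
  simp [childAt]
  omega

lemma go_fold (w : List Char) (f : Nat) (s : List Char)
    (IH : ∀ (s' : List Char) (memo : PySem.Dict (List Char) (List Char)),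
      s'.length < f → MemoOK w memo →
      (goAlt f w w.length s' memo).2 = best (s'.length + 1) w s' ∧
        MemoOK w (goAlt f w w.length s' memo).1)
    (hflen : s.length - w.length < f) :
    ∀ (js : List Nat) (_hmem : ∀ j ∈ js, (childAt w s j).length = s.length - w.length)
      (memo : PySem.Dict (List Char) (List Char)) (_hm : MemoOK w memo) (b : Option (List Char)),
      MemoOK w ((js.map (fun t : Nat => (t : Int))).foldl
        (fun (st : PySem.Dict (List Char) (List Char) × Option (List Char)) i =>
          let r := goAlt f w w.length
                     (PySem.List.slice s none (some i) ++ PySem.List.slice s (some (i + (w.length : Int))) none) st.1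
          (r.1, match st.2 with
                | none => some r.2
                | some bb => if r.2 < bb then some r.2 else some bb)) (memo, b)).1 ∧
      ((js.map (fun t : Nat => (t : Int))).foldl
        (fun (st : PySem.Dict (List Char) (List Char) × Option (List Char)) i =>
          let r := goAlt f w w.length
                     (PySem.List.slice s none (some i) ++ PySem.List.slice s (some (i + (w.length : Int))) none) st.1
          (r.1, match st.2 with
                | none => some r.2
                | some bb => if r.2 < bb then some r.2 else some bb)) (memo, b)).2
        = js.foldl
            (fun e j => match e with
              | none => some (best (s.length - w.length + 1) w (childAt w s j))
              | some bb => if best (s.length - w.length + 1) w (childAt w s j) < bb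
                  then some (best (s.length - w.length + 1) w (childAt w s j)) else some bb) b := by
  intro js
  induction js with
  | nil => intro _ memo hm b; exact ⟨hm, rfl⟩
  | cons j t iht =>
    intro hmem memo hm b
    simp only [List.map_cons, List.foldl_cons]
    rw [childAt_slice s w j]
    have hlen : (childAt w s j).length = s.length - w.length := hmem j List.mem_cons_self
    obtain ⟨hval, hmok'⟩ := IH (childAt w s j) memo (by omega) hm
    rw [hval, hlen]
    exact iht (fun j' hj' => hmem j' (List.mem_cons_of_mem _ hj')) _ hmok' _

lemma go_spec (w : List Char) (hw : w ≠ []) : ∀ (fuel : Nat) (s : List Char)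
    (memo : PySem.Dict (List Char) (List Char)), s.length < fuel → MemoOK w memo →
    (goAlt fuel w w.length s memo).2 = best (s.length + 1) w s ∧
      MemoOK w (goAlt fuel w w.length s memo).1 := by
  have hm1 : 0 < w.length := List.length_pos_of_ne_nil hw
  intro fuel
  induction fuel with
  | zero => intro s memo h _; omega
  | succ f ih =>
    intro s memo hs hmok
    simp only [goAlt]
    cases hget : memo.get? s with
    | some v => exact ⟨hmok s v hget, hmok⟩
    | none =>
      rw [occAlt_eq s w hw]
      cases hocc : occN w s with
      | nil =>
        have hbest : best (s.length + 1) w s = s := by simp [best, hocc]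
        simp only [List.map_nil, List.isEmpty_nil, if_true]
        refine ⟨hbest.symm, ?_⟩
        intro k v hkv
        rw [PySem.Dict.get?_insert] at hkv
        split_ifs at hkv with hk
        · cases hkv; subst hk; exact hbest.symm
        · exact hmok k v hkv
      | cons i is =>
        have hmemocc : ∀ j ∈ i :: is, j ∈ occN w s := by intro j hj; rw [hocc]; exact hj
        have hin : i + w.length ≤ s.length := (mem_occN (hmemocc i List.mem_cons_self)).1
        have hflen : s.length - w.length < f := by omega
        have hfold := go_fold w f s ih hflen (i :: is)
          (fun j hj => child_len (hmemocc j hj)) memo hmok none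
        simp only [List.map_cons, List.isEmpty_cons, Bool.false_eq_true, if_false]
        rw [List.map_cons] at hfold
        obtain ⟨hmok2, hval⟩ := hfold
        rw [optMinBy_cons (fun j => best (s.length - w.length + 1) w (childAt w s j)) i is] at hval
        have hbest : best (s.length + 1) w s
            = (is.map (fun j => best (s.length - w.length + 1) w (childAt w s j))).foldl min
                (best (s.length - w.length + 1) w (childAt w s i)) := by
          have hcong : ∀ j ∈ i :: is,
              best s.length w (childAt w s j) = best (s.length - w.length + 1) w (childAt w s j) := by
            intro j hj
            have hlen := child_len (hmemocc j hj)
            exact best_stable w hw s.length (s.length - w.length + 1) _ (by omega) (by omega)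
          conv_lhs => rw [best]
          rw [hocc, List.map_cons, hcong i List.mem_cons_self,
            List.map_congr_left (fun j hj => hcong j (List.mem_cons_of_mem _ hj))]
        constructor
        · rw [hval]
          exact hbest.symm
        · rw [hval]
          intro k v hkv
          rw [PySem.Dict.get?_insert] at hkv
          split_ifs at hkv with hk
          · cases hkv; subst hk; exact hbest.symm ▸ rfl
          · exact hmok2 k v hkv

-- ===== VERDICT (by name: the statement is the Claim_ definition above) =====
theorem answer_spec : Claim_equal_answer := by
  intro chunk word _ hpre
  unfold Spec_answer
  have hw : word.toList ≠ [] := by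
    rw [Ne, String.toList_eq_nil_iff]; exact hpre
  rw [answer, answer_alt]
  congr 1
  rw [answerA_eq word.toList hw]
  have h := go_spec word.toList hw (chunk.toList.length + 1) chunk.toList PySem.Dict.empty
    (by omega) (fun k v hkv => by rw [PySem.Dict.get?_empty] at hkv; cases hkv)
  rw [h.1]
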